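-- pv_equiv track=rewrite | github.com/nathankelete/comp110-22s-workspace | lessons/exam_review.py | odd_and_evens
-- ===== SOURCE A (Python) =====
-- def odd_and_evens(list_of_ints: list[int]) -> list[int]:
--     new_list: list[int] = []
--     i: int = 0
--     while i < len(list_of_ints):
--         if list_of_ints[i] % 2 != 0 and i % 2 == 0:
--             new_list.append(list_of_ints[i])
--             i += 1
--         else:
--             i += 1
--     return new_list
-- ===== SOURCE B (Python) =====
-- def odd_and_evens(list_of_ints: list[int]) -> list[int]:
--     return [v for v in list_of_ints[::2] if v % 2 != 0]
-- ===== Notes on version B (the rewrite author's own statement) =====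
-- stated objective: idiomatic
-- what changed: B iterates the stride-2 slice list_of_ints[::2] (never touching odd-index elements) and filters by value parity, instead of A's index-driven while loop testing both value and index parity per element.
import Mathlib
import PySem

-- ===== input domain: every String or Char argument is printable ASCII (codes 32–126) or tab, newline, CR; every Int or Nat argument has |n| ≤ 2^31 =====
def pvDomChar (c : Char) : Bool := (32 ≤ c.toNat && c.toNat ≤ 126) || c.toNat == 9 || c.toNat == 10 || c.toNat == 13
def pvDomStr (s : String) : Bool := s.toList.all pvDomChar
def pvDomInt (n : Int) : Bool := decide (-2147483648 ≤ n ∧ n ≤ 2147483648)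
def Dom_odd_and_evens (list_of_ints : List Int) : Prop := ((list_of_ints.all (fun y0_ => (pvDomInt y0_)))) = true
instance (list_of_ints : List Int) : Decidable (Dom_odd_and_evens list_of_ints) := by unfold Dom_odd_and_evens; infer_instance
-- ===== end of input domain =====

-- B replaces A's index-driven while loop by filtering the stride-2 slice xs[::2]; idiomatic, same cost.

-- ===== PORT A =====
-- the while loop of A: index i, accumulator new_list
def oddEvensLoop (xs : List Int) (i : Nat) (acc : List Int) : List Int :=
  if i < xs.length then
    if PySem.Int.mod (xs.getD i 0) 2 ≠ 0 ∧ i % 2 = 0 then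
      oddEvensLoop xs (i + 1) (acc ++ [xs.getD i 0])
    else
      oddEvensLoop xs (i + 1) acc
  else acc
termination_by xs.length - i

def odd_and_evens (list_of_ints : List Int) : List Int :=
  oddEvensLoop list_of_ints 0 []

-- ===== PORT B =====
def odd_and_evens_alt (list_of_ints : List Int) : List Int :=
  ((PySem.List.slice? list_of_ints none none 2).getD []).filter
    (fun v => decide (PySem.Int.mod v 2 ≠ 0))

-- ===== PRECONDITION & SPEC =====
def Spec_odd_and_evens (list_of_ints : List Int) (out : List Int) : Prop := out = odd_and_evens_alt list_of_ints
instance (list_of_ints : List Int) (out : List Int) : Decidable (Spec_odd_and_evens list_of_ints out) := by unfold Spec_odd_and_evens; infer_instance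

-- ===== CLAIM (what is proved, stated in full; the proofs are below) =====
def Claim_equal_odd_and_evens : Prop := ∀ (list_of_ints : List Int), Dom_odd_and_evens list_of_ints → Spec_odd_and_evens list_of_ints (odd_and_evens list_of_ints)

-- ===== LEMMAS AND PROOFS =====

-- the even-index elements of a list
def everyOther : List Int → List Int
  | [] => []
  | [x] => [x]
  | x :: _ :: r => x :: everyOther r

lemma everyOther_cons (x : Int) (r : List Int) : everyOther (x :: r) = x :: everyOther r.tail := by
  cases r <;> simp [everyOther]

-- abstract form of A's loop body: remaining list + index parity
def hAux : List Int → Nat → List Int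
  | [], _ => []
  | x :: r, p => (if PySem.Int.mod x 2 ≠ 0 ∧ p = 0 then [x] else []) ++ hAux r (1 - p)

lemma filterMap_range_everyOther (xs : List Int) :
    List.filterMap (fun k => xs[2 * k]?) (List.range ((xs.length + 1) / 2)) = everyOther xs := by
  induction xs using everyOther.induct with
  | case1 => simp [everyOther]
  | case2 x =>
    have h1 : ([x].length + 1) / 2 = 1 := by simp
    rw [h1]
    simp [everyOther, List.range_succ]
  | case3 x y r ih =>
    rw [everyOther]
    have hlen : ((x :: y :: r).length + 1) / 2 = (r.length + 1) / 2 + 1 := by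
      simp; omega
    rw [hlen, List.range_succ_eq_map, List.filterMap_cons, List.filterMap_map]
    have hf : ∀ k, (x :: y :: r)[2 * (k + 1)]? = r[2 * k]? := by
      intro k
      have h2 : 2 * (k + 1) = (2 * k + 1) + 1 := by omega
      rw [h2, List.getElem?_cons_succ, List.getElem?_cons_succ]
    have : ((fun k => (x :: y :: r)[2 * k]?) ∘ (fun k => k + 1)) = (fun k => r[2 * k]?) := by
      funext k
      simp only [Function.comp]
      exact hf k
    rw [this, ih]
    simp

lemma slice2_eq_everyOther (xs : List Int) :
    PySem.List.slice? xs none none 2 = some (everyOther xs) := by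
  rw [PySem.List.slice?, PySem.List.sliceIndices]
  simp only [if_neg (by norm_num : ¬ (2:Int) = 0), if_neg (by norm_num : ¬ (2:Int) < 0)]
  have hcount : (if (0:Int) < 2 then if (0:Int) < (xs.length:Int) then (((xs.length:Int) - 0 + 2 - 1) / 2).toNat else 0
      else if (xs.length:Int) < 0 then ((0 - (xs.length:Int) + -2 - 1) / -2).toNat else 0) = (xs.length + 1) / 2 := by
    split_ifs with h1 h2 <;> omega
  have hfun : ∀ k : Nat, xs[((0:Int) + 2 * (k:Int)).toNat]? = xs[2 * k]? := by
    intro k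
    congr 1
    omega
  simp only [hcount, hfun, filterMap_range_everyOther]

lemma hAux_zero_one (xs : List Int) :
    hAux xs 0 = (everyOther xs).filter (fun v => decide (PySem.Int.mod v 2 ≠ 0)) ∧
    hAux xs 1 = (everyOther xs.tail).filter (fun v => decide (PySem.Int.mod v 2 ≠ 0)) := by
  induction xs with
  | nil => simp [hAux, everyOther]
  | cons x r ih =>
    refine ⟨?_, ?_⟩
    · rw [hAux, everyOther_cons]
      by_cases h : PySem.Int.mod x 2 ≠ 0
      · have hx : x % 2 = 1 := by simpa using h
        simp [ih.2, hx]
      · have hx : x % 2 = 0 := by simpa using h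
        simp [ih.2, hx]
    · rw [hAux]
      simp [ih.1]

lemma loop_eq (xs : List Int) (n : Nat) :
    ∀ i acc, xs.length - i ≤ n →
      oddEvensLoop xs i acc = acc ++ hAux (xs.drop i) (i % 2) := by
  induction n with
  | zero =>
    intro i acc h
    rw [oddEvensLoop]
    have hlen : ¬ i < xs.length := by omega
    rw [if_neg hlen, List.drop_of_length_le (by omega)]
    simp [hAux]
  | succ n ih =>
    intro i acc h
    rw [oddEvensLoop]
    by_cases hi : i < xs.length
    · rw [if_pos hi]
      have hdrop : xs.drop i = xs[i] :: xs.drop (i + 1) := List.drop_eq_getElem_cons hi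
      have hgetD : xs.getD i 0 = xs[i] := List.getD_eq_getElem xs 0 hi
      have hpar : 1 - i % 2 = (i + 1) % 2 := by omega
      rw [hdrop, hAux, hpar, hgetD]
      by_cases hc : PySem.Int.mod xs[i] 2 ≠ 0 ∧ i % 2 = 0
      · rw [if_pos hc, if_pos hc, ih (i + 1) _ (by omega)]
        simp
      · rw [if_neg hc, if_neg hc, ih (i + 1) _ (by omega)]
        simp
    · rw [if_neg hi, List.drop_of_length_le (by omega)]
      simp [hAux]

-- ===== VERDICT (by name: the statement is the Claim_ definition above) =====
theorem odd_and_evens_spec : Claim_equal_odd_and_evens := by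
  intro xs _
  unfold Spec_odd_and_evens odd_and_evens odd_and_evens_alt
  rw [slice2_eq_everyOther, loop_eq xs xs.length 0 [] (by omega)]
  simp [(hAux_zero_one xs).1]
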